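-- pv_equiv track=rewrite | github.com/Lucian292/Python-Labs | tema 2/problema9.py | find_unseen_seats
-- ===== SOURCE A (Python) =====
-- def find_unseen_seats(matrix: list[list[int]]) -> list[tuple[int, int]]:  # (row, col
--     unseen_seats = []
--     rows = len(matrix)
--     cols = len(matrix[0])
--
--     for row in range(rows):
--         for col in range(cols):
--             height = matrix[row][col]
--             can_see = True
--
--             # Check if there is a taller spectator in front
--             for r in range(row + 1, rows):
--                 if matrix[r][col] > height:
--                     can_see = False
--                     break
--
--             if not can_see:
--                 unseen_seats.append((row, col))
--
--     return unseen_seats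
-- ===== SOURCE B (Python) =====
-- def find_unseen_seats(matrix: list[list[int]]) -> list[tuple[int, int]]:
--     # One bottom-up pass keeping a per-column suffix maximum (O(rows*cols))
--     cols = len(matrix[0])
--     suffmax = [None] * cols  # max height strictly below the current row, per column
--     blocks = []  # per-row result blocks, collected bottom-up
--     for i in range(len(matrix) - 1, -1, -1):
--         row = matrix[i]
--         blocks.append([(i, c) for c in range(cols)
--                        if suffmax[c] is not None and suffmax[c] > row[c]])
--         for c in range(cols):
--             if suffmax[c] is None or row[c] > suffmax[c]:
--                 suffmax[c] = row[c]
--     return [seat for block in reversed(blocks) for seat in block]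
-- ===== Notes on version B (the rewrite author's own statement) =====
-- stated objective: faster
-- what changed: Replaced the per-seat rescan of all rows below (triple nested loop) by a single bottom-up pass that maintains a per-column suffix maximum.
import Mathlib
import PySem

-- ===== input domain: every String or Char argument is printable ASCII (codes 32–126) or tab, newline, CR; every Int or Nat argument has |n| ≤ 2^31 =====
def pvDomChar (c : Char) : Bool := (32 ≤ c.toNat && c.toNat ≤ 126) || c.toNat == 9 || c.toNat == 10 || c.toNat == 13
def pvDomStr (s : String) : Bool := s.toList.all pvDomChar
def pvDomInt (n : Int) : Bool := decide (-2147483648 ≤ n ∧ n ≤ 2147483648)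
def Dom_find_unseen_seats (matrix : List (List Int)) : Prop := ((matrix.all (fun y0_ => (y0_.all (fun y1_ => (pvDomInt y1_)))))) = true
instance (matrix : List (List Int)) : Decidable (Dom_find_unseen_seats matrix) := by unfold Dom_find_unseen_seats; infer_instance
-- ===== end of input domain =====

-- B replaces A's per-seat rescan of the rows below by a single bottom-up pass with a
-- per-column suffix maximum (objective: faster, asymptotically).

-- ===== PORT A =====
-- literal transliteration of A's triple loop; list indexing via getD, exact on Pre_
def find_unseen_seats (matrix : List (List Int)) : List (Int × Int) :=
  let rows := matrix.length
  let cols := (matrix.headD []).length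
  (List.range rows).foldl (fun acc row =>
    (List.range cols).foldl (fun acc2 col =>
      let height := (matrix.getD row []).getD col 0
      let can_see := (List.range' (row+1) (rows - (row+1))).all
          (fun r => !decide ((matrix.getD r []).getD col 0 > height))
      if !can_see then acc2 ++ [((row : Int), (col : Int))] else acc2) acc) []

-- ===== PORT B =====
-- Source B's bottom-up pass: the recursion processes the rows below first, returning their
-- unseen seats together with the per-column suffix maxima (Option Int = Python's None list)
def bAux (cols : Nat) (i : Nat) (rows : List (List Int)) :
    List (Int × Int) × List (Option Int) :=
  match rows with
  | [] => ([], List.replicate cols none)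
  | row :: rest =>
    let p := bAux cols (i+1) rest
    let rowRes := (List.range cols).filterMap (fun c =>
      match p.2.getD c none with
      | some m => if decide (m > row.getD c 0) then some ((i : Int), (c : Int)) else none
      | none => none)
    let suff := (List.range cols).map (fun c =>
      let v := row.getD c 0
      match p.2.getD c none with
      | some m => some (if v > m then v else m)
      | none => some v)
    (rowRes ++ p.1, suff)

def find_unseen_seats_alt (matrix : List (List Int)) : List (Int × Int) :=
  (bAux (matrix.headD []).length 0 matrix).1

-- ===== PRECONDITION & SPEC =====
-- Pre_ excludes exactly the inputs where Python A raises IndexError: the empty matrix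
-- (matrix[0]) and matrices with a row shorter than the first row (matrix[r][col]).
def Pre_find_unseen_seats (matrix : List (List Int)) : Prop :=
  matrix ≠ [] ∧ ∀ row ∈ matrix, (matrix.headD []).length ≤ row.length
instance (matrix : List (List Int)) : Decidable (Pre_find_unseen_seats matrix) := by
  unfold Pre_find_unseen_seats; infer_instance

def pvWitness_find_unseen_seats : List (List Int) := [[1, 2], [3, 0]]

def Spec_find_unseen_seats (matrix : List (List Int)) (out : List (Int × Int)) : Prop :=
  out = find_unseen_seats_alt matrix
instance (matrix : List (List Int)) (out : List (Int × Int)) :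
    Decidable (Spec_find_unseen_seats matrix out) := by
  unfold Spec_find_unseen_seats; infer_instance

-- ===== CLAIM (what is proved, stated in full; the proofs are below) =====
def Claim_equal_find_unseen_seats : Prop :=
  ∀ (matrix : List (List Int)), Dom_find_unseen_seats matrix →
    Pre_find_unseen_seats matrix →
    Spec_find_unseen_seats matrix (find_unseen_seats matrix)

-- ===== LEMMAS AND PROOFS =====

-- common specification both ports are reduced to
def cSpec (cols : Nat) (i : Nat) (rows : List (List Int)) : List (Int × Int) :=
  match rows with
  | [] => []
  | row :: rest =>
    ((List.range cols).filter
        (fun c => rest.any (fun r' => decide (r'.getD c 0 > row.getD c 0)))).map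
      (fun c : Nat => ((i : Int), (c : Int))) ++ cSpec cols (i+1) rest

-- per-column suffix maximum of a block of rows
def colMax (rows : List (List Int)) (c : Nat) : Option Int :=
  match rows with
  | [] => none
  | row :: rest =>
    match colMax rest c with
    | none => some (row.getD c 0)
    | some m => some (if row.getD c 0 > m then row.getD c 0 else m)

theorem map_getD_range' (l : List (List Int)) :
    ∀ (n a : Nat), n = l.length - a →
      (List.range' a n).map (fun r => l.getD r ([] : List Int)) = l.drop a := by
  intro n
  induction n with
  | zero =>
    intro a h
    have : l.length ≤ a := by omega
    simp [List.drop_of_length_le this]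
  | succ k ih =>
    intro a h
    have ha : a < l.length := by omega
    rw [List.range'_succ, List.map_cons, ih (a+1) (by omega)]
    rw [List.getD_eq_getElem l [] ha]
    exact (List.getElem_cons_drop ha)

theorem any_getD_range' (l : List (List Int)) (a : Nat) (p : List Int → Bool) :
    (List.range' a (l.length - a)).any (fun r => p (l.getD r [])) = (l.drop a).any p := by
  rw [← map_getD_range' l (l.length - a) a rfl, List.any_map]
  rfl

theorem filterMap_if_eq_map_filter {α β : Type} (l : List α) (p : α → Bool) (f : α → β) :
    l.filterMap (fun c => if p c then some (f c) else none) = (l.filter p).map f := by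
  induction l with
  | nil => rfl
  | cons x t ih =>
    by_cases h : p x = true <;> simp [h, ih]

theorem colMax_gt (c : Nat) (v : Int) :
    ∀ (rest : List (List Int)),
      (match colMax rest c with
       | some m => decide (m > v)
       | none => false) = rest.any (fun r' => decide (r'.getD c 0 > v)) := by
  intro rest
  induction rest with
  | nil => rfl
  | cons row t ih =>
    simp only [colMax, List.any_cons, ← ih]
    cases h : colMax t c with
    | none => simp
    | some m =>
      simp only []
      have : ∀ p q : Prop, [Decidable p] → [Decidable q] → (decide p || decide q) = decide (p ∨ q) := by
        intro p q _ _; by_cases hp : p <;> by_cases hq : q <;> simp [hp, hq]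
      rw [this]
      rw [decide_eq_decide]
      split_ifs with h <;> omega

theorem bAux_snd (cols : Nat) :
    ∀ (rows : List (List Int)) (i c : Nat), c < cols →
      (bAux cols i rows).2.getD c none = colMax rows c := by
  intro rows
  induction rows with
  | nil => intro i c hc; simp [bAux, colMax, List.getD]
  | cons row t ih =>
    intro i c hc
    simp only [bAux, colMax]
    rw [List.getD_eq_getElem?_getD, List.getElem?_map, List.getElem?_range hc]
    simp only [Option.map_some, Option.getD_some]
    rw [ih (i+1) c hc]
    cases colMax t c <;> rfl

theorem bAux_fst (cols : Nat) :
    ∀ (rows : List (List Int)) (i : Nat),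
      (bAux cols i rows).1 = cSpec cols i rows := by
  intro rows
  induction rows with
  | nil => intro i; rfl
  | cons row t ih =>
    intro i
    simp only [bAux, cSpec]
    rw [ih (i+1)]
    congr 1
    rw [← filterMap_if_eq_map_filter]
    apply List.filterMap_congr
    intro c hc
    have hclt : c < cols := List.mem_range.mp hc
    rw [bAux_snd cols t (i+1) c hclt, ← colMax_gt c (row.getD c 0) t]
    cases colMax t c <;> simp

theorem not_all_not (l : List Nat) (q : Nat → Bool) :
    (!l.all fun r => !q r) = l.any q := by
  induction l with
  | nil => rfl
  | cons x t ih => simp [List.all_cons, List.any_cons, ← ih]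

theorem A_suffix (matrix : List (List Int)) :
    ∀ (n a : Nat), n = matrix.length - a →
      (List.range' a n).flatMap (fun row =>
        ((List.range (matrix.headD []).length).filter (fun col =>
          !(List.range' (row+1) (matrix.length - (row+1))).all
            (fun r => !decide ((matrix.getD r []).getD col 0 >
                               (matrix.getD row []).getD col 0)))).map
          (fun col : Nat => ((row : Int), (col : Int)))) =
      cSpec (matrix.headD []).length a (matrix.drop a) := by
  intro n
  induction n with
  | zero =>
    intro a h
    have : matrix.length ≤ a := by omega
    simp [List.drop_of_length_le this, cSpec]
  | succ k ih =>
    intro a h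
    have ha : a < matrix.length := by omega
    rw [List.range'_succ, List.flatMap_cons, ih (a+1) (by omega)]
    rw [← List.getElem_cons_drop ha]
    simp only [cSpec]
    congr 1
    · congr 1
      apply List.filter_congr
      intro col _
      rw [not_all_not, any_getD_range' matrix (a+1)
            (fun r' => decide (r'.getD col 0 > (matrix.getD a []).getD col 0)),
          List.getD_eq_getElem matrix [] ha]

theorem A_eq_cSpec (matrix : List (List Int)) :
    find_unseen_seats matrix = cSpec (matrix.headD []).length 0 matrix := by
  unfold find_unseen_seats
  simp only []
  rw [show (List.range matrix.length) = List.range' 0 matrix.length from List.range_eq_range']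
  have h1 : ∀ (acc : List (Int × Int)) (row : Nat),
      (List.range (matrix.headD []).length).foldl (fun acc2 col =>
        if !(List.range' (row+1) (matrix.length - (row+1))).all
              (fun r => !decide ((matrix.getD r []).getD col 0 >
                                 (matrix.getD row []).getD col 0))
        then acc2 ++ [((row : Int), (col : Int))] else acc2) acc =
      acc ++ ((List.range (matrix.headD []).length).filter (fun col =>
        !(List.range' (row+1) (matrix.length - (row+1))).all
          (fun r => !decide ((matrix.getD r []).getD col 0 >
                             (matrix.getD row []).getD col 0)))).map
        (fun col : Nat => ((row : Int), (col : Int))) := by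
    intro acc row
    exact PySem.List.foldl_append_if _ _ _ _
  calc (List.range' 0 matrix.length).foldl (fun acc row =>
        (List.range (matrix.headD []).length).foldl (fun acc2 col =>
          if !(List.range' (row+1) (matrix.length - (row+1))).all
                (fun r => !decide ((matrix.getD r []).getD col 0 >
                                   (matrix.getD row []).getD col 0))
          then acc2 ++ [((row : Int), (col : Int))] else acc2) acc) []
      = (List.range' 0 matrix.length).foldl (fun acc row =>
          acc ++ ((List.range (matrix.headD []).length).filter (fun col =>
            !(List.range' (row+1) (matrix.length - (row+1))).all
              (fun r => !decide ((matrix.getD r []).getD col 0 >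
                                 (matrix.getD row []).getD col 0)))).map
            (fun col : Nat => ((row : Int), (col : Int)))) [] := by
        apply PySem.List.foldl_congr_mem
        intro acc row _
        exact h1 acc row
    _ = cSpec (matrix.headD []).length 0 matrix := by
        rw [PySem.List.foldl_append_eq_flatMap]
        rw [List.nil_append]
        have := A_suffix matrix matrix.length 0 (by omega)
        simpa using this

-- ===== VERDICT (by name: the statement is the Claim_ definition above) =====
theorem find_unseen_seats_spec : Claim_equal_find_unseen_seats := by
  intro matrix _ _
  unfold Spec_find_unseen_seats find_unseen_seats_alt
  rw [A_eq_cSpec, bAux_fst]
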